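-- pv_equiv track=rewrite | github.com/CarlosBeiramar/computer-science-degree | algorithmic-laboratories2/Torneio_4/torneio4.py | NorteSul
-- ===== SOURCE A (Python) =====
-- def NorteSul(m,v):
--     Norte_Sul = v[0]
--     for x in Norte_Sul:
--         if x == 1:
--             indice = Norte_Sul.index(x)
--             if m [0][indice] == None:
--                 m[0][indice] = len(m)
--         elif x==len(m):
--             for y in range(0,len(m)):
--                 indice = Norte_Sul.index(x)
--                 if m[y][indice] == None:
--                     m[y][indice] = y+1
--     return m
-- ===== SOURCE B (Python) =====
-- def NorteSul(m, v):
--     n = len(m)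
--     ns = v[0]
--     if 1 in ns:
--         i = ns.index(1)
--         if m[0][i] is None:
--             m[0][i] = n
--     if n in ns:
--         j = ns.index(n)
--         for y in range(n):
--             if m[y][j] is None:
--                 m[y][j] = y + 1
--     return m
-- ===== Notes on version B (the rewrite author's own statement) =====
-- stated objective: simpler
-- what changed: A scans every element of v[0] and re-dispatches (re-running list.index and, for x==len(m), the whole row loop once per occurrence); B deletes that outer scan entirely and does two direct membership+first-index lookups, writing each affected cell exactly once.
import Mathlib
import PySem

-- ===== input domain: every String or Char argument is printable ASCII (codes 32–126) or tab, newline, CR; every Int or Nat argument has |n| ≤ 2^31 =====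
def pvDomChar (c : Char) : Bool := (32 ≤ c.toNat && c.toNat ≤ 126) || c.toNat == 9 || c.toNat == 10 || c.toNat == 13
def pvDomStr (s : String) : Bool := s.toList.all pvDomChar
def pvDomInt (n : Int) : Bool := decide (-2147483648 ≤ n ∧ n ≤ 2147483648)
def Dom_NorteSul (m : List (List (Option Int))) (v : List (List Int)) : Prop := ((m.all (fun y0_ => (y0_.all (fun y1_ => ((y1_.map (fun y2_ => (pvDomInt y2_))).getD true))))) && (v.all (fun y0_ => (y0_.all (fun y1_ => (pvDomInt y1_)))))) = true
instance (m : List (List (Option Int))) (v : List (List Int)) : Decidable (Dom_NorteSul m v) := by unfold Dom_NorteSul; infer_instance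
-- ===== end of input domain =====

-- B replaces A's whole-list scan-and-dispatch by two direct membership + first-index
-- lookups and a single row loop (objective: simpler). Both Pythons mutate m in place;
-- the equivalence proved here is about the RETURN value.

-- shared cell primitives: both Pythons read 'm[y][j] == None' and assign 'm[y][j] = val'
-- (defaults make the Lean reads/writes total; Pre_ keeps every actual access in range)
def cellIsNone (m : List (List (Option Int))) (y j : Nat) : Bool :=
  ((m.getD y []).getD j (some 0)) == none

def setCell (m : List (List (Option Int))) (y j : Nat) (val : Int) : List (List (Option Int)) :=
  m.set y ((m.getD y []).set j (some val))

-- ===== PORT A =====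
def NorteSul (m : List (List (Option Int))) (v : List (List Int)) : List (List (Option Int)) :=
  let ns := v.headD []        -- v[0]; v = [] raises, excluded by Pre_
  ns.foldl (fun acc x =>
    if x = 1 then
      let indice := (PySem.List.index? ns x).getD 0
      if cellIsNone acc 0 indice then setCell acc 0 indice (acc.length : Int) else acc
    else if x = (acc.length : Int) then
      (List.range acc.length).foldl (fun acc2 y =>
        let indice := (PySem.List.index? ns x).getD 0
        if cellIsNone acc2 y indice then setCell acc2 y indice ((y : Int) + 1) else acc2) acc
    else acc) m

-- ===== PORT B =====
def NorteSul_alt (m : List (List (Option Int))) (v : List (List Int)) : List (List (Option Int)) :=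
  let n := m.length
  let ns := v.headD []        -- v[0]; v = [] raises, excluded by Pre_
  let m1 :=
    if (1 : Int) ∈ ns then
      let i := (PySem.List.index? ns 1).getD 0
      if cellIsNone m 0 i then setCell m 0 i (n : Int) else m
    else m
  if (n : Int) ∈ ns then
    let j := (PySem.List.index? ns (n : Int)).getD 0
    (List.range n).foldl (fun acc y =>
      if cellIsNone acc y j then setCell acc y j ((y : Int) + 1) else acc) m1
  else m1

-- ===== PRECONDITION & SPEC =====
-- Pre_ excludes exactly the inputs where the Python A raises: empty v (IndexError on v[0]),
-- and out-of-range column accesses m[0][i] / m[y][j] in the two write branches.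
def Pre_NorteSul (m : List (List (Option Int))) (v : List (List Int)) : Prop :=
  v ≠ [] ∧
  ((1 : Int) ∈ v.headD [] →
    m ≠ [] ∧ (PySem.List.index? (v.headD []) 1).getD 0 < (m.headD []).length) ∧
  ((m.length : Int) ∈ v.headD [] →
    ∀ row ∈ m, (PySem.List.index? (v.headD []) (m.length : Int)).getD 0 < row.length)
instance (m : List (List (Option Int))) (v : List (List Int)) : Decidable (Pre_NorteSul m v) := by unfold Pre_NorteSul; infer_instance

def pvWitness_NorteSul : List (List (Option Int)) × List (List Int) := ([[none]], [[1]])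

def Spec_NorteSul (m : List (List (Option Int))) (v : List (List Int)) (out : List (List (Option Int))) : Prop := out = NorteSul_alt m v
instance (m : List (List (Option Int))) (v : List (List Int)) (out : List (List (Option Int))) : Decidable (Spec_NorteSul m v out) := by unfold Spec_NorteSul; infer_instance

-- ===== CLAIM (what is proved, stated in full; the proofs are below) =====
def Claim_equal_NorteSul : Prop := ∀ (m : List (List (Option Int))) (v : List (List Int)), Dom_NorteSul m v → Pre_NorteSul m v → Spec_NorteSul m v (NorteSul m v)

-- ===== LEMMAS AND PROOFS =====

-- conditional write of one cell, and the row loop of the x == len(m) branch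
def wr (y j : Nat) (val : Int) (m : List (List (Option Int))) : List (List (Option Int)) :=
  if cellIsNone m y j then setCell m y j val else m

def wrN (n j : Nat) (m : List (List (Option Int))) : List (List (Option Int)) :=
  (List.range n).foldl (fun acc y => wr y j ((y : Int) + 1) acc) m

theorem length_setCell (m : List (List (Option Int))) (y j : Nat) (v : Int) :
    (setCell m y j v).length = m.length := by simp [setCell]

theorem length_wr (y j : Nat) (v : Int) (m : List (List (Option Int))) :
    (wr y j v m).length = m.length := by
  unfold wr; split <;> simp [length_setCell]

theorem length_wrN (n j : Nat) (m : List (List (Option Int))) :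
    (wrN n j m).length = m.length := by
  unfold wrN
  induction (List.range n) generalizing m with
  | nil => rfl
  | cons y l ih => simp [List.foldl_cons, ih, length_wr]

theorem getD_set_self {α : Type} (l : List α) (k : Nat) (a d : α) (h : k < l.length) :
    (l.set k a).getD k d = a := by
  simp [List.getD_eq_getElem?_getD, List.getElem?_set_self h]

theorem getD_set_ne {α : Type} (l : List α) {k k' : Nat} (a d : α) (h : k ≠ k') :
    (l.set k a).getD k' d = l.getD k' d := by
  simp [List.getD_eq_getElem?_getD, List.getElem?_set_ne h]

theorem getD_oob {α : Type} (l : List α) {k : Nat} (d : α) (h : l.length ≤ k) :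
    l.getD k d = d := by
  simp [List.getD_eq_getElem?_getD, List.getElem?_eq_none h]

theorem setCell_oob {m : List (List (Option Int))} {y : Nat} (j : Nat) (v : Int)
    (h : m.length <= y) : setCell m y j v = m := by
  unfold setCell; exact List.set_eq_of_length_le h

theorem cellIsNone_setCell_self (m : List (List (Option Int))) (y j : Nat) (v : Int) :
    cellIsNone (setCell m y j v) y j = false := by
  by_cases hy : y < m.length
  · unfold cellIsNone setCell
    rw [getD_set_self _ _ _ _ hy]
    by_cases hj : j < (m.getD y []).length
    · rw [getD_set_self _ _ _ _ hj]; rfl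
    · rw [List.set_eq_of_length_le (Nat.le_of_not_lt hj), getD_oob _ _ (Nat.le_of_not_lt hj)]
      rfl
  · rw [setCell_oob _ _ (Nat.le_of_not_lt hy)]
    unfold cellIsNone
    rw [getD_oob _ _ (Nat.le_of_not_lt hy), getD_oob _ _ (Nat.zero_le j)]
    rfl

theorem cellIsNone_setCell_ne (m : List (List (Option Int))) {y j y' j' : Nat} (v : Int)
    (h : y ≠ y' ∨ j ≠ j') :
    cellIsNone (setCell m y j v) y' j' = cellIsNone m y' j' := by
  unfold cellIsNone setCell
  by_cases hy : y = y'
  · subst hy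
    rcases h with h | h
    · exact absurd rfl h
    · by_cases hyl : y < m.length
      · rw [getD_set_self _ _ _ _ hyl, getD_set_ne _ _ _ h]
      · rw [List.set_eq_of_length_le (Nat.le_of_not_lt hyl)]
  · rw [getD_set_ne _ _ _ hy]

theorem rowsGetD_setCell_ne (m : List (List (Option Int))) {y y' : Nat} (j : Nat) (v : Int)
    (h : y ≠ y') : (setCell m y j v).getD y' [] = m.getD y' [] := by
  unfold setCell
  exact getD_set_ne _ _ _ h

theorem setCell_comm (m : List (List (Option Int))) {y j y' j' : Nat} (v v' : Int)
    (h : y ≠ y' ∨ j ≠ j') :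
    setCell (setCell m y j v) y' j' v' = setCell (setCell m y' j' v') y j v := by
  by_cases hy : y = y'
  · subst hy
    rcases h with h | h
    · exact absurd rfl h
    · by_cases hyl : y < m.length
      · unfold setCell
        rw [getD_set_self _ _ _ _ hyl, getD_set_self _ _ _ _ hyl,
            List.set_set, List.set_set]
        exact congrArg (m.set y) (List.set_comm _ _ h)
      · have h1 := setCell_oob (m := m) (y := y) j v (Nat.le_of_not_lt hyl)
        have h2 := setCell_oob (m := m) (y := y) j' v' (Nat.le_of_not_lt hyl)
        rw [h1, h2, h1]
  · have e1 : (setCell m y j v).getD y' [] = m.getD y' [] := rowsGetD_setCell_ne _ _ _ hy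
    have e2 : (setCell m y' j' v').getD y [] = m.getD y [] := rowsGetD_setCell_ne _ _ _ (Ne.symm hy)
    unfold setCell
    unfold setCell at e1 e2
    rw [e1, e2]
    exact List.set_comm _ _ hy

theorem wr_idem (y j : Nat) (v : Int) (m : List (List (Option Int))) :
    wr y j v (wr y j v m) = wr y j v m := by
  unfold wr
  by_cases h : cellIsNone m y j = true
  · simp [h, cellIsNone_setCell_self]
  · simp [h]

theorem wr_comm {y j y' j' : Nat} (v v' : Int) (h : y ≠ y' ∨ j ≠ j')
    (m : List (List (Option Int))) :
    wr y j v (wr y' j' v' m) = wr y' j' v' (wr y j v m) := by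
  unfold wr
  have ha' : ∀ m0, cellIsNone (setCell m0 y j v) y' j' = cellIsNone m0 y' j' :=
    fun m0 => cellIsNone_setCell_ne m0 _ h
  have hb' : ∀ m0, cellIsNone (setCell m0 y' j' v') y j = cellIsNone m0 y j :=
    fun m0 => cellIsNone_setCell_ne m0 _ (h.imp Ne.symm Ne.symm)
  by_cases ha : cellIsNone m y j = true <;> by_cases hb : cellIsNone m y' j' = true <;>
    simp [ha, hb, ha', hb']
  exact setCell_comm m v' v (h.imp Ne.symm Ne.symm)

-- wr commutes with the row loop (arbitrary index list)

theorem wr_fold_comm (i j : Nat) (v : Int) (hij : i ≠ j) (l : List Nat)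
    (m : List (List (Option Int))) :
    wr 0 i v (l.foldl (fun acc y => wr y j ((y : Int) + 1) acc) m) =
      l.foldl (fun acc y => wr y j ((y : Int) + 1) acc) (wr 0 i v m) := by
  induction l generalizing m with
  | nil => rfl
  | cons y l ih => simp only [List.foldl_cons, ih, wr_comm _ _ (Or.inr hij)]

theorem wrstep_fold_comm (j y : Nat) (l : List Nat) (m : List (List (Option Int))) :
    wr y j ((y : Int) + 1) (l.foldl (fun acc y' => wr y' j ((y' : Int) + 1) acc) m) =
      l.foldl (fun acc y' => wr y' j ((y' : Int) + 1) acc) (wr y j ((y : Int) + 1) m) := by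
  induction l generalizing m with
  | nil => rfl
  | cons y' l ih =>
    simp only [List.foldl_cons, ih]
    by_cases hy : y = y'
    · subst hy; rfl
    · rw [wr_comm _ _ (Or.inl hy)]

theorem fold_wr_idem (j : Nat) (l : List Nat) (m : List (List (Option Int))) :
    l.foldl (fun acc y => wr y j ((y : Int) + 1) acc)
        (l.foldl (fun acc y => wr y j ((y : Int) + 1) acc) m) =
      l.foldl (fun acc y => wr y j ((y : Int) + 1) acc) m := by
  induction l generalizing m with
  | nil => rfl
  | cons y l ih =>
    simp only [List.foldl_cons]
    rw [wrstep_fold_comm, wr_idem, ih]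

theorem wrN_idem (n j : Nat) (m : List (List (Option Int))) :
    wrN n j (wrN n j m) = wrN n j m := fold_wr_idem j (List.range n) m

theorem wr_wrN_comm (n i j : Nat) (v : Int) (hij : i ≠ j) (m : List (List (Option Int))) :
    wr 0 i v (wrN n j m) = wrN n j (wr 0 i v m) :=
  wr_fold_comm i j v hij (List.range n) m

theorem wrN_one (i : Nat) (m : List (List (Option Int))) :
    wrN 1 i m = wr 0 i ((1 : Nat) : Int) m := by
  unfold wrN
  norm_num [List.range_succ]

-- A's loop body with the length fixed to n
def stepA (ns : List Int) (n : Nat) (acc : List (List (Option Int))) (x : Int) :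
    List (List (Option Int)) :=
  if x = 1 then wr 0 ((PySem.List.index? ns 1).getD 0) (n : Int) acc
  else if x = (n : Int) then wrN n ((PySem.List.index? ns (n : Int)).getD 0) acc
  else acc

theorem length_stepA (ns : List Int) (n : Nat) (acc : List (List (Option Int))) (x : Int) :
    (stepA ns n acc x).length = acc.length := by
  unfold stepA; split
  · exact length_wr _ _ _ _
  · split
    · exact length_wrN _ _ _
    · rfl

-- A's real fold equals the fold of stepA (len(m) is invariant under the writes)
theorem foldA_eq (ns l : List Int) (n : Nat) (m : List (List (Option Int)))
    (hlen : m.length = n) :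
    l.foldl (fun acc x =>
      if x = 1 then
        let indice := (PySem.List.index? ns x).getD 0
        if cellIsNone acc 0 indice then setCell acc 0 indice (acc.length : Int) else acc
      else if x = (acc.length : Int) then
        (List.range acc.length).foldl (fun acc2 y =>
          let indice := (PySem.List.index? ns x).getD 0
          if cellIsNone acc2 y indice then setCell acc2 y indice ((y : Int) + 1) else acc2) acc
      else acc) m =
    l.foldl (stepA ns n) m := by
  induction l generalizing m with
  | nil => rfl
  | cons x l ih =>
    simp only [List.foldl_cons]
    have hstep : (if x = 1 then
          if cellIsNone m 0 ((PySem.List.index? ns x).getD 0) then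
            setCell m 0 ((PySem.List.index? ns x).getD 0) (m.length : Int) else m
        else if x = (m.length : Int) then
          (List.range m.length).foldl (fun acc2 y =>
            if cellIsNone acc2 y ((PySem.List.index? ns x).getD 0) then
              setCell acc2 y ((PySem.List.index? ns x).getD 0) ((y : Int) + 1) else acc2) m
        else m) = stepA ns n m x := by
      unfold stepA
      by_cases hx1 : x = 1
      · subst hx1; simp [wr, hlen]
      · simp only [if_neg hx1, hlen]
        by_cases hxn : x = (n : Int)
        · subst hxn; simp [wrN, wr]
        · simp [hxn]
    rw [hstep, ih _ (by rw [length_stepA, hlen])]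

-- the heart: folding stepA over any sublist of ns performs at most the two writes, B's way
theorem fold_stepA_eq (ns : List Int) (n : Nat) (l : List Int) (m : List (List (Option Int)))
    (hsub : ∀ x ∈ l, x ∈ ns) :
    l.foldl (stepA ns n) m =
      (if (n : Int) ∈ l then
        wrN n ((PySem.List.index? ns (n : Int)).getD 0)
          (if (1 : Int) ∈ l then wr 0 ((PySem.List.index? ns 1).getD 0) (n : Int) m else m)
      else
        (if (1 : Int) ∈ l then wr 0 ((PySem.List.index? ns 1).getD 0) (n : Int) m else m)) := by
  induction l generalizing m with
  | nil => simp
  | cons x l ih =>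
    have hsub' : ∀ x ∈ l, x ∈ ns := fun x hx => hsub x (List.mem_cons_of_mem _ hx)
    simp only [List.foldl_cons]
    rw [ih _ hsub']
    by_cases hx1 : x = 1
    · subst hx1
      have hstep : stepA ns n m 1 = wr 0 ((PySem.List.index? ns 1).getD 0) (n : Int) m := by
        unfold stepA; simp
      rw [hstep]
      have hL : (if (1 : Int) ∈ l then
            wr 0 ((PySem.List.index? ns 1).getD 0) (n : Int)
              (wr 0 ((PySem.List.index? ns 1).getD 0) (n : Int) m)
          else wr 0 ((PySem.List.index? ns 1).getD 0) (n : Int) m) =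
          wr 0 ((PySem.List.index? ns 1).getD 0) (n : Int) m := by
        by_cases h1t : (1 : Int) ∈ l <;> simp [h1t, wr_idem]
      rw [hL, if_pos (List.mem_cons_self : (1 : Int) ∈ _)]
      by_cases hnt : (n : Int) ∈ l
      · rw [if_pos hnt, if_pos (List.mem_cons_of_mem _ hnt)]
      · rw [if_neg hnt]
        by_cases hn1 : (n : Int) = 1
        · have hn : n = 1 := by exact_mod_cast hn1
          subst hn
          rw [if_pos (by simp), wrN_one]
          exact (wr_idem _ _ _ _).symm
        · rw [if_neg (by simp [hn1, hnt])]
    · by_cases hxn : x = (n : Int)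
      · subst hxn
        have hstep : stepA ns n m (n : Int) =
            wrN n ((PySem.List.index? ns (n : Int)).getD 0) m := by
          unfold stepA
          rw [if_neg hx1, if_pos rfl]
        rw [hstep]
        have hmem_n : ((n : Int) ∈ (n : Int) :: l) := List.mem_cons_self
        simp only [hmem_n, if_true, List.mem_cons]
        have h1iff : ((1 : Int) = (n : Int) ∨ (1 : Int) ∈ l) ↔ (1 : Int) ∈ l := by
          constructor
          · rintro (h | h)
            · exact absurd h.symm hx1
            · exact h
          · exact Or.inr
        rw [if_congr h1iff rfl rfl]
        by_cases h1t : (1 : Int) ∈ l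
        · -- need i ≠ j : positions of 1 and n in ns differ since 1 ≠ n
          have h1ns : (1 : Int) ∈ ns := hsub' _ h1t
          have hnns : (n : Int) ∈ ns := hsub _ List.mem_cons_self
          obtain ⟨i, hi⟩ := (PySem.List.index?_isSome_iff (xs := ns) (v := 1)).mpr h1ns |>
            (fun h => Option.isSome_iff_exists.mp h)
          obtain ⟨j, hj⟩ := (PySem.List.index?_isSome_iff (xs := ns) (v := (n : Int))).mpr hnns |>
            (fun h => Option.isSome_iff_exists.mp h)
          have hij : (PySem.List.index? ns 1).getD 0 ≠ (PySem.List.index? ns (n : Int)).getD 0 := by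
            rw [hi, hj]
            obtain ⟨hki, hvi, -⟩ := PySem.List.getElem_of_index?_eq_some hi
            obtain ⟨hkj, hvj, -⟩ := PySem.List.getElem_of_index?_eq_some hj
            simp only [Option.getD_some]
            intro hc
            subst hc
            rw [hvi] at hvj
            exact hx1 hvj.symm
          simp only [h1t, if_true]
          rw [wr_wrN_comm _ _ _ _ hij]
          by_cases hnt : (n : Int) ∈ l <;> simp [hnt, wrN_idem]
        · simp only [h1t, if_false]
          by_cases hnt : (n : Int) ∈ l <;> simp [hnt, wrN_idem]
      · have hstep : stepA ns n m x = m := by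
          unfold stepA; rw [if_neg hx1, if_neg hxn]
        rw [hstep]
        have h1 : ((1 : Int) ∈ x :: l) ↔ (1 : Int) ∈ l := by
          simp only [List.mem_cons, or_iff_right_iff_imp]
          intro h; exact absurd h.symm hx1
        have hn : ((n : Int) ∈ x :: l) ↔ (n : Int) ∈ l := by
          simp only [List.mem_cons, or_iff_right_iff_imp]
          intro h; exact absurd h.symm hxn
        rw [if_congr hn rfl rfl, if_congr h1 rfl rfl]

theorem NorteSul_eq_alt (m : List (List (Option Int))) (v : List (List Int)) :
    NorteSul m v = NorteSul_alt m v := by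
  unfold NorteSul NorteSul_alt
  rw [foldA_eq (v.headD []) (v.headD []) m.length m rfl,
      fold_stepA_eq (v.headD []) m.length (v.headD []) m (fun _ hx => hx)]
  by_cases h1 : (1 : Int) ∈ v.headD [] <;>
    by_cases hn : ((m.length : Nat) : Int) ∈ v.headD [] <;>
      simp [wrN, wr]

-- ===== VERDICT (by name: the statement is the Claim_ definition above) =====
theorem NorteSul_spec : Claim_equal_NorteSul := by
  intro m v _ _
  unfold Spec_NorteSul
  exact NorteSul_eq_alt m v
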